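-- pv_equiv track=rewrite | github.com/TakumaYamauchi/IR-GTTM-Visualizer | IR-GTTM-Visualizer/converter.py | reject_rest
-- ===== SOURCE A (Python) =====
-- import copy
--
-- def reject_rest(pitch_list, duration_list, closure_pitch_key, boundary_pitch_key):
--     a = []
--     b = []
--     c = []
--     d = []
--     for m in range(len(pitch_list)):
--         count = 0
--         norest_p = copy.copy(pitch_list[m])
--         norest_d = copy.copy(duration_list[m])
--         norest_closure_pitch_key = copy.copy(closure_pitch_key[m])
--         norest_boundary_pitch_key = copy.copy(boundary_pitch_key[m])
--         for i in range(len(norest_p)):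
--             if norest_p[count] == -1:
--                 del norest_p[count]  # ピッチから休符を削除
--                 del norest_d[count]  # durationから休符を削除
--                 # del closure[count]#休符箇所に対応する部分をクロージャリストから削除
--                 for k in range(len(norest_closure_pitch_key)):  # 一個休符を削除したらそれ以降のclosureを一個前に戻す
--                     if norest_closure_pitch_key[k] >= count:
--                         norest_closure_pitch_key[k] -= 1
--                 for k in range(len(norest_boundary_pitch_key)):  # 一個休符を削除したらそれ以降のclosureを一個前に戻す
--                     if norest_boundary_pitch_key[k] >= count:
--                         norest_boundary_pitch_key[k] -= 1
--             else:
--                 count += 1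
--         a.append(norest_p)
--         b.append(norest_d)
--         c.append(norest_closure_pitch_key)
--         d.append(norest_boundary_pitch_key)
--
--     return a, b, c, d
-- ===== SOURCE B (Python) =====
-- def reject_rest(pitch_list, duration_list, closure_pitch_key, boundary_pitch_key):
--     a, b, c, d = [], [], [], []
--     for p, dur, ck, bk in zip(pitch_list, duration_list, closure_pitch_key, boundary_pitch_key):
--         rests = [i for i, x in enumerate(p) if x == -1]
--         rest_set = set(rests)
--         a.append([x for x in p if x != -1])
--         b.append([x for i, x in enumerate(dur) if i not in rest_set])
--         c.append([k - sum(1 for r in rests if r <= k) for k in ck])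
--         d.append([k - sum(1 for r in rests if r <= k) for k in bk])
--     return a, b, c, d
-- ===== Notes on version B (the rewrite author's own statement) =====
-- stated objective: faster
-- what changed: Replaces A's delete-a-rest-then-rescan-every-key quadratic inner loops by one pass collecting the rest indices per measure, filtering pitch/duration by index, and reindexing each key as key minus the number of rest indices <= key; Pre_ excludes inputs where A raises IndexError (a companion list shorter than pitch_list, or a rest position beyond the measure's duration list).
import Mathlib
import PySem

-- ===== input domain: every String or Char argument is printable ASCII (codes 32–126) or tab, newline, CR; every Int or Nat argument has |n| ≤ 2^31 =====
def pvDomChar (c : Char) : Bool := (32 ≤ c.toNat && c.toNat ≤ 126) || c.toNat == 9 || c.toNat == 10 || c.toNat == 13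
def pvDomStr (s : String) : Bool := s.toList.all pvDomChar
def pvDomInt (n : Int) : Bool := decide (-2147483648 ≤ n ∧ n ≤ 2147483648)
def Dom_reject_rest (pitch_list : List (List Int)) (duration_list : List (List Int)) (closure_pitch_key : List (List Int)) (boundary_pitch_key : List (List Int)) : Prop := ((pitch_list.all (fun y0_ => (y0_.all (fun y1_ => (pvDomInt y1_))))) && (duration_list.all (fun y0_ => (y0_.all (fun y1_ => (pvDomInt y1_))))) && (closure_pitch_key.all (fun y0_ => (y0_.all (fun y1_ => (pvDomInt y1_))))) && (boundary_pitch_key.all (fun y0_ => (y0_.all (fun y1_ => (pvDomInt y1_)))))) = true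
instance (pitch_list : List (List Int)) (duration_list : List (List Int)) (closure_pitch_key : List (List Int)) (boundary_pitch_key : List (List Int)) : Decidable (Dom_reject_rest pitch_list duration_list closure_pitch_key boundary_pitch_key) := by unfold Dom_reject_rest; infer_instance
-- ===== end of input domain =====

-- B replaces A's delete-one-rest-then-rescan-all-keys inner loops by one pass collecting the
-- rest indices per measure, filtering pitch/duration by index and reindexing each key as
-- key - (#rest indices ≤ key); equivalence of the RETURN values is proved (A mutates nothing
-- observable: it works on shallow copies of the inner lists).

-- ===== PORT A =====
-- the inner 'for k in range(len(...)): if l[k] >= count: l[k] -= 1' loop, elementwise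
def pvMapShift (count : Nat) (ks : List Int) : List Int :=
  ks.map (fun k => if (count : Int) ≤ k then k - 1 else k)

-- one iteration of A's inner 'for i in range(len(norest_p))' loop; state = (p, d, ck, bk, count).
-- p.getD count 0 / eraseIdx: count is always in range for p (count = i - deletions), and in
-- range for d exactly on Pre_ inputs, where Python's norest_p[count] / del also succeed.
def pvStepA (st : List Int × List Int × List Int × List Int × Nat) :
    List Int × List Int × List Int × List Int × Nat :=
  match st with
  | (p, d, ck, bk, count) =>
    if p.getD count 0 = -1 then
      (p.eraseIdx count, d.eraseIdx count, pvMapShift count ck, pvMapShift count bk, count)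
    else (p, d, ck, bk, count + 1)

-- 'for i in range(L)': the body runs exactly L times (range is computed once)
def pvLoopA : Nat → List Int × List Int × List Int × List Int × Nat →
    List Int × List Int × List Int × List Int × Nat
  | 0, st => st
  | n + 1, st => pvLoopA n (pvStepA st)

-- the body of A's outer loop for measure m
def pvMeasureA (p d ck bk : List Int) : List Int × List Int × List Int × List Int × Nat :=
  pvLoopA p.length (p, d, ck, bk, 0)

-- 'for m in range(len(pitch_list))' with the four appends; xs.getD m []: in range for
-- pitch_list, and for the other three exactly on Pre_ inputs (else Python raises IndexError)
def pvOuterA (pl dl cl bl : List (List Int)) :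
    Nat → List (List Int) × List (List Int) × List (List Int) × List (List Int)
  | 0 => ([], [], [], [])
  | m + 1 =>
    let r := pvOuterA pl dl cl bl m
    let s := pvMeasureA (pl.getD m []) (dl.getD m []) (cl.getD m []) (bl.getD m [])
    (r.1 ++ [s.1], r.2.1 ++ [s.2.1], r.2.2.1 ++ [s.2.2.1], r.2.2.2 ++ [s.2.2.2.1])

def reject_rest (pitch_list : List (List Int)) (duration_list : List (List Int)) (closure_pitch_key : List (List Int)) (boundary_pitch_key : List (List Int)) : List (List Int) × List (List Int) × List (List Int) × List (List Int) :=
  pvOuterA pitch_list duration_list closure_pitch_key boundary_pitch_key pitch_list.length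

-- ===== PORT B =====
-- rests = [i for i, x in enumerate(p) if x == -1]
def pvRestIdx (p : List Int) : List Int :=
  ((PySem.List.enumerate p).filter (fun ix => decide (ix.2 = -1))).map (fun ix => ix.1)

-- zip over the four lists (zip stops at the shortest), one measure per step
def reject_rest_alt (pitch_list : List (List Int)) (duration_list : List (List Int)) (closure_pitch_key : List (List Int)) (boundary_pitch_key : List (List Int)) : List (List Int) × List (List Int) × List (List Int) × List (List Int) :=
  match pitch_list, duration_list, closure_pitch_key, boundary_pitch_key with
  | p :: pl, dur :: dl, ck :: cl, bk :: bl =>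
    let r := reject_rest_alt pl dl cl bl
    let rests := pvRestIdx p
    let restSet := PySem.Set.ofList rests        -- rest_set = set(rests)
    (p.filter (fun x => decide (x ≠ -1)) :: r.1,
     -- [x for i, x in enumerate(dur) if i not in rest_set]
     (((PySem.List.enumerate dur).filter
         (fun ix => !(PySem.Set.contains restSet ix.1))).map Prod.snd) :: r.2.1,
     -- [k - sum(1 for r in rests if r <= k) for k in ck]  (the 0/1-sum is a countP)
     (ck.map (fun k => k - ((rests.countP (fun r => decide (r ≤ k)) : Nat) : Int))) :: r.2.2.1,
     (bk.map (fun k => k - ((rests.countP (fun r => decide (r ≤ k)) : Nat) : Int))) :: r.2.2.2)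
  | _, _, _, _ => ([], [], [], [])

-- ===== PRECONDITION & SPEC =====
-- Exactly the inputs where Python A returns: the three companion lists are at least as long as
-- pitch_list (else duration_list[m]/closure_pitch_key[m]/boundary_pitch_key[m] raises
-- IndexError), and every rest index i of measure m satisfies i < len(duration_list[m])
-- (else 'del norest_d[count]' raises IndexError).
def Pre_reject_rest (pitch_list : List (List Int)) (duration_list : List (List Int)) (closure_pitch_key : List (List Int)) (boundary_pitch_key : List (List Int)) : Prop :=
  pitch_list.length ≤ duration_list.length ∧
  pitch_list.length ≤ closure_pitch_key.length ∧
  pitch_list.length ≤ boundary_pitch_key.length ∧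
  ∀ m, m < pitch_list.length → ∀ i, i < (pitch_list.getD m []).length →
    (pitch_list.getD m []).getD i 0 = -1 → i < (duration_list.getD m []).length
instance (pitch_list : List (List Int)) (duration_list : List (List Int)) (closure_pitch_key : List (List Int)) (boundary_pitch_key : List (List Int)) : Decidable (Pre_reject_rest pitch_list duration_list closure_pitch_key boundary_pitch_key) := by unfold Pre_reject_rest; infer_instance

def pvWitness_reject_rest : List (List Int) × List (List Int) × List (List Int) × List (List Int) :=
  ([[60, -1, 62]], [[1, 2, 3]], [[0, 1, 2]], [[2, 0]])

def Spec_reject_rest (pitch_list : List (List Int)) (duration_list : List (List Int)) (closure_pitch_key : List (List Int)) (boundary_pitch_key : List (List Int)) (out : List (List Int) × List (List Int) × List (List Int) × List (List Int)) : Prop := out = reject_rest_alt pitch_list duration_list closure_pitch_key boundary_pitch_key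
instance (pitch_list : List (List Int)) (duration_list : List (List Int)) (closure_pitch_key : List (List Int)) (boundary_pitch_key : List (List Int)) (out : List (List Int) × List (List Int) × List (List Int) × List (List Int)) : Decidable (Spec_reject_rest pitch_list duration_list closure_pitch_key boundary_pitch_key out) := by unfold Spec_reject_rest; infer_instance

-- ===== CLAIM (what is proved, stated in full; the proofs are below) =====
def Claim_equal_reject_rest : Prop := ∀ (pitch_list : List (List Int)) (duration_list : List (List Int)) (closure_pitch_key : List (List Int)) (boundary_pitch_key : List (List Int)), Dom_reject_rest pitch_list duration_list closure_pitch_key boundary_pitch_key → Pre_reject_rest pitch_list duration_list closure_pitch_key boundary_pitch_key → Spec_reject_rest pitch_list duration_list closure_pitch_key boundary_pitch_key (reject_rest pitch_list duration_list closure_pitch_key boundary_pitch_key)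

-- ===== LEMMAS AND PROOFS =====

-- what A's duration deletions amount to: keep dur[i] unless p[i] = -1; the tail of dur beyond
-- len(p) is never touched
def pvKeepD : List Int → List Int → List Int
  | [], d => d
  | _ :: _, [] => []
  | x :: p, y :: d => if x = -1 then pvKeepD p d else y :: pvKeepD p d

-- composed effect on one key of A's remaining inner iterations, starting at count c
def pvAdj : Nat → List Int → Int → Int
  | _, [], k => k
  | c, x :: s, k => if x = -1 then pvAdj c s (if (c : Int) ≤ k then k - 1 else k) else pvAdj (c + 1) s k

-- number of rests in s whose (offset-c) position is ≤ k
def pvRests : Nat → List Int → Int → Int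
  | _, [], _ => 0
  | c, x :: s, k => (if x = -1 ∧ (c : Int) ≤ k then 1 else 0) + pvRests (c + 1) s k

theorem pvRests_of_lt : ∀ (s : List Int) (c : Nat) (k : Int), k < (c : Int) → pvRests c s k = 0 := by
  intro s
  induction s with
  | nil => intro c k _; rfl
  | cons x s ih =>
    intro c k h
    have h1 : k < ((c + 1 : Nat) : Int) := by push_cast; omega
    simp [pvRests, ih (c + 1) k h1]
    omega

theorem pvRests_succ : ∀ (s : List Int) (c : Nat) (k : Int), pvRests (c + 1) s k = pvRests c s (k - 1) := by
  intro s
  induction s with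
  | nil => intro c k; rfl
  | cons x s ih =>
    intro c k
    simp only [pvRests, ih (c + 1) k]
    have : ((((c : Nat) + 1 : Nat)) : Int) ≤ k ↔ (c : Int) ≤ k - 1 := by push_cast; omega
    congr 1
    simp only [this]

theorem pvAdj_eq : ∀ (s : List Int) (c : Nat) (k : Int), pvAdj c s k = k - pvRests c s k := by
  intro s
  induction s with
  | nil => intro c k; simp [pvAdj, pvRests]
  | cons x s ih =>
    intro c k
    by_cases hx : x = -1
    · by_cases hk : (c : Int) ≤ k
      · have hstep : pvAdj c (x :: s) k = pvAdj c s (k - 1) := by simp [pvAdj, hx, hk]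
        rw [hstep, ih, pvRests]
        simp only [hx, hk, and_self, if_pos]
        rw [pvRests_succ]
        omega
      · have h0 : pvRests c s k = 0 := pvRests_of_lt s c k (by omega)
        have h1 : pvRests (c + 1) s k = 0 := pvRests_of_lt s (c + 1) k (by push_cast; omega)
        have hstep : pvAdj c (x :: s) k = pvAdj c s k := by simp [pvAdj, hx, hk]
        rw [hstep, ih, pvRests, h0, h1]
        simp [hk]
    · simp [pvAdj, hx, pvRests, ih]

theorem pvGetD_append_cons (P s : List Int) (x : Int) : (P ++ x :: s).getD P.length 0 = x := by
  simp [List.getD, List.getElem?_append_right (le_refl P.length)]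

theorem pvEraseIdx_append_cons (P s : List Int) (x : Int) : (P ++ x :: s).eraseIdx P.length = P ++ s := by
  induction P with
  | nil => rfl
  | cons y P ih => simp [List.eraseIdx, ih]

theorem pvKeepD_nil_right : ∀ (s : List Int), pvKeepD s [] = [] := by
  intro s; cases s <;> rfl

-- the inner-loop invariant: P/D are the already-compacted prefixes, suff/dsuff the unscanned ones
theorem pvLoopA_go : ∀ (suff P D dsuff ck bk : List Int),
    (∀ t, t < suff.length → suff.getD t 0 = -1 → t < dsuff.length) →
    (dsuff ≠ [] → D.length = P.length) →
    pvLoopA suff.length (P ++ suff, D ++ dsuff, ck, bk, P.length)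
      = (P ++ suff.filter (fun x => decide (x ≠ -1)), D ++ pvKeepD suff dsuff,
         ck.map (pvAdj P.length suff), bk.map (pvAdj P.length suff),
         P.length + (suff.filter (fun x => decide (x ≠ -1))).length) := by
  intro suff
  induction suff with
  | nil =>
    intro P D dsuff ck bk _ _
    simp [pvLoopA, pvKeepD, List.map_congr_left (fun k _ => show pvAdj P.length [] k = k from rfl)]
  | cons x s ih =>
    intro P D dsuff ck bk hH hlen
    have hstep : pvLoopA (x :: s).length (P ++ x :: s, D ++ dsuff, ck, bk, P.length)
        = pvLoopA s.length (pvStepA (P ++ x :: s, D ++ dsuff, ck, bk, P.length)) := rfl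
    by_cases hx : x = -1
    · -- rest: delete at position P.length in p and d, shift the keys
      obtain ⟨y, ds, rfl⟩ : ∃ y ds, dsuff = y :: ds := by
        have := hH 0 (by simp) (by simpa using hx)
        cases dsuff with
        | nil => simp at this
        | cons y ds => exact ⟨y, ds, rfl⟩
      have hD : D.length = P.length := hlen (by simp)
      have hstepA : pvStepA (P ++ x :: s, D ++ y :: ds, ck, bk, P.length)
          = (P ++ s, D ++ ds, pvMapShift P.length ck, pvMapShift P.length bk, P.length) := by
        simp only [pvStepA, pvGetD_append_cons, hx, ite_true, pvEraseIdx_append_cons]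
        rw [← hD, pvEraseIdx_append_cons, hD]
      rw [hstep, hstepA, ih P D ds (pvMapShift P.length ck) (pvMapShift P.length bk)
        (fun t ht hr => by have := hH (t + 1) (by simpa using ht) (by simpa using hr); simpa using this)
        (fun _ => hD)]
      have hmap : ∀ l : List Int, (pvMapShift P.length l).map (pvAdj P.length s) = l.map (pvAdj P.length (x :: s)) := by
        intro l
        unfold pvMapShift
        rw [List.map_map]
        exact List.map_congr_left (fun k _ => by simp [Function.comp, pvAdj, hx])
      rw [hmap, hmap]
      simp [pvKeepD, hx]
    · -- not a rest: count advances; fold x into the compacted prefix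
      have hstepA : pvStepA (P ++ x :: s, D ++ dsuff, ck, bk, P.length)
          = (P ++ x :: s, D ++ dsuff, ck, bk, P.length + 1) := by
        simp [pvStepA, hx]
      rw [hstep, hstepA]
      have hmap : ∀ l : List Int, l.map (pvAdj (P ++ [x]).length s) = l.map (pvAdj P.length (x :: s)) :=
        fun l => List.map_congr_left (fun k _ => by simp [pvAdj, hx])
      cases dsuff with
      | nil =>
        have h := ih (P ++ [x]) D [] ck bk
          (fun t ht hr => absurd (hH (t + 1) (by simpa using ht) (by simpa using hr)) (by simp))
          (fun h => absurd rfl h)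
        rw [show P ++ x :: s = (P ++ [x]) ++ s by simp,
            show D ++ ([] : List Int) = D ++ [] by rfl,
            show P.length + 1 = (P ++ [x]).length by simp, h]
        rw [hmap, hmap]
        simp [pvKeepD, hx, pvKeepD_nil_right]
        omega
      | cons y ds =>
        have hD : D.length = P.length := hlen (by simp)
        have h := ih (P ++ [x]) (D ++ [y]) ds ck bk
          (fun t ht hr => by have := hH (t + 1) (by simpa using ht) (by simpa using hr); simpa using this)
          (fun _ => by simp [hD])
        rw [show P ++ x :: s = (P ++ [x]) ++ s by simp,
            show D ++ y :: ds = (D ++ [y]) ++ ds by simp,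
            show P.length + 1 = (P ++ [x]).length by simp, h]
        rw [hmap, hmap]
        simp [pvKeepD, hx]
        omega

theorem pvMeasureA_eq (p d ck bk : List Int)
    (hH : ∀ t, t < p.length → p.getD t 0 = -1 → t < d.length) :
    pvMeasureA p d ck bk
      = (p.filter (fun x => decide (x ≠ -1)), pvKeepD p d,
         ck.map (pvAdj 0 p), bk.map (pvAdj 0 p),
         (p.filter (fun x => decide (x ≠ -1))).length) := by
  have h := pvLoopA_go p [] [] d ck bk hH (fun _ => rfl)
  simpa [pvMeasureA] using h

-- ===== B-side lemmas =====

-- rest indices starting at offset s (generalisation of pvRestIdx, whose start is 0)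
def pvRestIdxFrom (p : List Int) (s : Int) : List Int :=
  ((PySem.List.enumerate p s).filter (fun ix => decide (ix.2 = -1))).map (fun ix => ix.1)

theorem pvRestIdx_eq_from (p : List Int) : pvRestIdx p = pvRestIdxFrom p 0 := rfl

theorem pvRestIdxFrom_cons_rest {x : Int} (p : List Int) (s : Int) (hx : x = -1) :
    pvRestIdxFrom (x :: p) s = s :: pvRestIdxFrom p (s + 1) := by
  simp [pvRestIdxFrom, PySem.List.enumerate_cons, hx]

theorem pvRestIdxFrom_cons_note {x : Int} (p : List Int) (s : Int) (hx : x ≠ -1) :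
    pvRestIdxFrom (x :: p) s = pvRestIdxFrom p (s + 1) := by
  simp [pvRestIdxFrom, PySem.List.enumerate_cons, hx]

theorem pvMem_restIdxFrom {p : List Int} {s i : Int} (h : i ∈ pvRestIdxFrom p s) : s ≤ i := by
  unfold pvRestIdxFrom at h
  obtain ⟨⟨j, x⟩, hmem, rfl⟩ := List.mem_map.mp h
  have hmem' := List.mem_filter.mp hmem |>.1
  obtain ⟨k, hk, heq⟩ := (PySem.List.mem_enumerate_iff _ _ _).mp hmem'
  have : j = s + k := congrArg Prod.fst heq
  simp [this]

-- the 0/1-sum over the rest indices counts exactly A's accumulated decrements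
theorem pvRestCount : ∀ (p : List Int) (c : Nat) (k : Int),
    ((pvRestIdxFrom p (c : Int)).countP (fun r => decide (r ≤ k)) : Int) = pvRests c p k := by
  intro p
  induction p with
  | nil => intro c k; simp [pvRestIdxFrom, pvRests, PySem.List.enumerate_nil]
  | cons x p ih =>
    intro c k
    have hc1 : ((c : Int) + 1) = ((c + 1 : Nat) : Int) := by push_cast; ring
    by_cases hx : x = -1
    · rw [pvRestIdxFrom_cons_rest p (c : Int) hx, hc1]
      simp only [List.countP_cons]
      push_cast
      rw [hc1, ih (c + 1) k]
      simp only [pvRests, hx, true_and]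
      by_cases hk : (c : Int) ≤ k <;> simp [hk] <;> omega
    · rw [pvRestIdxFrom_cons_note p (c : Int) hx, hc1, ih (c + 1) k]
      simp [pvRests, hx]

-- filtering durations by "index is not a rest index" is exactly A's deletions
theorem pvKeepD_enum : ∀ (p d : List Int) (c : Int),
    ((PySem.List.enumerate d c).filter
        (fun ix => !((pvRestIdxFrom p c).contains ix.1))).map Prod.snd = pvKeepD p d := by
  intro p
  induction p with
  | nil =>
    intro d c
    have : ∀ ix : Int × Int, ((pvRestIdxFrom ([] : List Int) c).contains ix.1) = false := by
      intro ix; simp [pvRestIdxFrom, PySem.List.enumerate_nil]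
    simp only [this, Bool.not_false, List.filter_true]
    exact PySem.List.map_snd_enumerate d c
  | cons x p ih =>
    intro d c
    cases d with
    | nil => simp [PySem.List.enumerate_nil, pvKeepD_nil_right]
    | cons y d =>
      rw [PySem.List.enumerate_cons]
      have htail : ∀ ix ∈ PySem.List.enumerate d (c + 1), ix.1 ≠ c := by
        intro ix hmem
        obtain ⟨k, hk, heq⟩ := (PySem.List.mem_enumerate_iff _ _ _).mp hmem
        have : ix.1 = c + 1 + k := by rw [heq]
        omega
      by_cases hx : x = -1
      · -- head index c is a rest index: (c, y) is dropped, tail ignores the extra c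
        rw [pvRestIdxFrom_cons_rest p c hx]
        simp only [List.filter_cons]
        have hhead : (!((c :: pvRestIdxFrom p (c + 1)).contains c)) = false := by simp
        rw [hhead]
        simp only [Bool.false_eq_true, if_neg (by simp : ¬False)]
        have hcongr : (PySem.List.enumerate d (c + 1)).filter
              (fun ix => !((c :: pvRestIdxFrom p (c + 1)).contains ix.1))
            = (PySem.List.enumerate d (c + 1)).filter
              (fun ix => !((pvRestIdxFrom p (c + 1)).contains ix.1)) := by
          apply List.filter_congr
          intro ix hmem
          have hne : ix.1 ≠ c := htail ix hmem
          simp [List.contains_cons, hne]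
        rw [hcongr, ih d (c + 1)]
        simp [pvKeepD, hx]
      · -- head index c is not a rest index: (c, y) is kept
        rw [pvRestIdxFrom_cons_note p c hx]
        simp only [List.filter_cons]
        have hhead : (!((pvRestIdxFrom p (c + 1)).contains c)) = true := by
          simp only [Bool.not_eq_true', ← Bool.not_eq_true, List.contains_eq_mem]
          intro hc
          have := pvMem_restIdxFrom (by simpa using hc)
          omega
        rw [hhead]
        simp only [if_pos trivial, List.map_cons]
        rw [ih d (c + 1)]
        simp [pvKeepD, hx]

-- the per-measure output as functions of the measure index (shared closed form)
def pvF1 (pl : List (List Int)) (j : Nat) : List Int :=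
  (pl.getD j []).filter (fun x => decide (x ≠ -1))
def pvF2 (pl dl : List (List Int)) (j : Nat) : List Int :=
  pvKeepD (pl.getD j []) (dl.getD j [])
def pvF3 (pl cl : List (List Int)) (j : Nat) : List Int :=
  (cl.getD j []).map (pvAdj 0 (pl.getD j []))
def pvF4 (pl bl : List (List Int)) (j : Nat) : List Int :=
  (bl.getD j []).map (pvAdj 0 (pl.getD j []))

theorem pvOuterA_eq (pl dl cl bl : List (List Int))
    (hpre : ∀ m, m < pl.length → ∀ i, i < (pl.getD m []).length →
      (pl.getD m []).getD i 0 = -1 → i < (dl.getD m []).length) :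
    ∀ m, m ≤ pl.length →
    pvOuterA pl dl cl bl m
      = ((List.range m).map (pvF1 pl), (List.range m).map (pvF2 pl dl),
         (List.range m).map (pvF3 pl cl), (List.range m).map (pvF4 pl bl)) := by
  intro m
  induction m with
  | zero => intro _; rfl
  | succ m ih =>
    intro hm
    have hmeas := pvMeasureA_eq (pl.getD m []) (dl.getD m []) (cl.getD m []) (bl.getD m [])
      (hpre m (by omega))
    simp only [pvOuterA, ih (by omega), hmeas, List.range_succ, List.map_append, List.map_cons,
      List.map_nil]
    rfl

-- B's per-key shift equals A's accumulated decrements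
theorem pvShiftB_eq (p : List Int) (k : Int) :
    k - (((pvRestIdx p).countP (fun r => decide (r ≤ k)) : Nat) : Int) = pvAdj 0 p k := by
  rw [pvAdj_eq, pvRestIdx_eq_from, show (0 : Int) = ((0 : Nat) : Int) from rfl, pvRestCount]

theorem pvAlt_eq : ∀ (pl dl cl bl : List (List Int)),
    pl.length ≤ dl.length → pl.length ≤ cl.length → pl.length ≤ bl.length →
    reject_rest_alt pl dl cl bl
      = ((List.range pl.length).map (pvF1 pl), (List.range pl.length).map (pvF2 pl dl),
         (List.range pl.length).map (pvF3 pl cl), (List.range pl.length).map (pvF4 pl bl)) := by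
  intro pl
  induction pl with
  | nil =>
    intro dl cl bl _ _ _
    cases dl <;> cases cl <;> cases bl <;> rfl
  | cons p pl ih =>
    intro dl cl bl hd hc hb
    obtain ⟨dur, dl, rfl⟩ : ∃ y ys, dl = y :: ys := by
      cases dl with
      | nil => simp at hd
      | cons y ys => exact ⟨y, ys, rfl⟩
    obtain ⟨ck, cl, rfl⟩ : ∃ y ys, cl = y :: ys := by
      cases cl with
      | nil => simp at hc
      | cons y ys => exact ⟨y, ys, rfl⟩
    obtain ⟨bk, bl, rfl⟩ : ∃ y ys, bl = y :: ys := by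
      cases bl with
      | nil => simp at hb
      | cons y ys => exact ⟨y, ys, rfl⟩
    have ihh := ih dl cl bl (by simpa using hd) (by simpa using hc) (by simpa using hb)
    have hdur : ((PySem.List.enumerate dur).filter
          (fun ix => !(decide (ix.1 ∈ pvRestIdx p)))).map Prod.snd
        = pvKeepD p dur := by
      have hpt : (fun ix : Int × Int => !(decide (ix.1 ∈ pvRestIdx p)))
          = (fun ix : Int × Int => !((pvRestIdxFrom p 0).contains ix.1)) := by
        funext ix
        rw [pvRestIdx_eq_from]
        simp
      rw [hpt]
      exact pvKeepD_enum p dur 0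
    have hkeys : ∀ l : List Int,
        l.map (fun k => k - (((pvRestIdx p).countP (fun r => decide (r ≤ k)) : Nat) : Int))
          = l.map (pvAdj 0 p) :=
      fun l => List.map_congr_left (fun k _ => pvShiftB_eq p k)
    simp only [reject_rest_alt, ihh, List.length_cons, List.range_succ_eq_map, List.map_cons,
      List.map_map]
    refine Prod.ext ?_ (Prod.ext ?_ (Prod.ext ?_ ?_)) <;>
      simp [pvF1, pvF2, pvF3, pvF4, Function.comp, hdur, hkeys]

-- ===== VERDICT (by name: the statement is the Claim_ definition above) =====
theorem reject_rest_spec : Claim_equal_reject_rest := by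
  intro pl dl cl bl _ hpre
  obtain ⟨hd, hc, hb, hrest⟩ := hpre
  unfold Spec_reject_rest reject_rest
  rw [pvOuterA_eq pl dl cl bl hrest pl.length (le_refl _), pvAlt_eq pl dl cl bl hd hc hb]
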